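-- pv_equiv track=rewrite | github.com/Rocky-Zhenxiang-Fang/LeetCode | 777. Swap Adjancent in LR String.py | canTransforms
-- ===== SOURCE A (Python) =====
-- def canTransforms(start: str, end: str) -> bool:
--     start_data = [(ch, i) for i, ch in enumerate(start) if ch == "R" or ch == "L"]
--     end_data = [(ch, i) for i, ch in enumerate(end) if ch == "R" or ch == "L"]
--
--     if len(start_data) != len(end_data):
--         return False
--
--     for i in range(len(start_data)):
--         start_LR, start_idx = start_data[i]
--         end_LR, end_idx = end_data[i]
--         if start_LR != end_LR or (start_LR == "R" and start_idx > end_idx) or (start_LR == "L" and start_idx < end_idx):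
--             return False
--
--     return True
-- ===== SOURCE B (Python) =====
-- def canTransforms(start: str, end: str) -> bool:
--     i, j = 0, 0
--     n, m = len(start), len(end)
--     while i < n or j < m:
--         if i < n and start[i] != "R" and start[i] != "L":
--             i += 1
--         elif j < m and end[j] != "R" and end[j] != "L":
--             j += 1
--         elif i == n or j == m:
--             return False
--         else:
--             c = start[i]
--             if c != end[j]:
--                 return False
--             if c == "R" and i > j:
--                 return False
--             if c == "L" and i < j:
--                 return False
--             i += 1
--             j += 1
--     return True
-- ===== Notes on version B (the rewrite author's own statement) =====
-- stated objective: alternative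
-- what changed: Replaces A's two materialised filtered (char,index) lists plus a length check and an indexed loop with a single two-pointer scan that walks both strings simultaneously, skipping non-L/R characters in place.
import Mathlib
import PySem

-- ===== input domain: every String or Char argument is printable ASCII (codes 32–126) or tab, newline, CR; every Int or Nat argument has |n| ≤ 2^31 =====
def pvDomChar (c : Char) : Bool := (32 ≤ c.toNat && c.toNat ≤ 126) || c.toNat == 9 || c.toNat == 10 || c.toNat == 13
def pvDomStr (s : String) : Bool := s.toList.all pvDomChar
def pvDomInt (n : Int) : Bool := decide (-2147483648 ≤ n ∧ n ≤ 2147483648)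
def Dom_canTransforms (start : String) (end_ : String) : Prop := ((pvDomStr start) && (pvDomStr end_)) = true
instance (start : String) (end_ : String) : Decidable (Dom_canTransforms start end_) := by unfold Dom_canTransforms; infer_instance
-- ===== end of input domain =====

-- B replaces A's two materialised filtered index-lists with a single two-pointer scan
-- over both strings (idiomatic/alternative; same return value, no speed claim).

-- ===== PORT A =====
-- the for-loop over range(len(start_data)) with early return, as recursion over the paired lists
def goA : List (Char × Int) → List (Char × Int) → Bool
  | (c, si) :: ss, (d, ei) :: es =>
      if c ≠ d ∨ (c = 'R' ∧ si > ei) ∨ (c = 'L' ∧ si < ei) then false else goA ss es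
  | _, _ => true

def canTransforms (start : String) (end_ : String) : Bool :=
  let start_data := ((PySem.List.enumerate start.toList 0).filter
      (fun p => p.2 == 'R' || p.2 == 'L')).map (fun p => (p.2, p.1))
  let end_data := ((PySem.List.enumerate end_.toList 0).filter
      (fun p => p.2 == 'R' || p.2 == 'L')).map (fun p => (p.2, p.1))
  if start_data.length ≠ end_data.length then false
  else goA start_data end_data

-- ===== PORT B =====
-- the while-loop of Source B: state = (remaining suffix of start, remaining suffix of end_, i, j)
def scanB : List Char → List Char → Int → Int → Bool
  | c :: s', e, i, j =>
      if c ≠ 'R' ∧ c ≠ 'L' then scanB s' e (i + 1) j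
      else match e with
        | d :: e' =>
            if d ≠ 'R' ∧ d ≠ 'L' then scanB (c :: s') e' i (j + 1)
            else if c ≠ d then false
            else if c = 'R' ∧ i > j then false
            else if c = 'L' ∧ i < j then false
            else scanB s' e' (i + 1) (j + 1)
        | [] => false
  | [], d :: e', i, j =>
      if d ≠ 'R' ∧ d ≠ 'L' then scanB [] e' i (j + 1) else false
  | [], [], _, _ => true
termination_by s e _ _ => s.length + e.length

def canTransforms_alt (start : String) (end_ : String) : Bool :=
  scanB start.toList end_.toList 0 0

-- ===== PRECONDITION & SPEC =====
def Spec_canTransforms (start : String) (end_ : String) (out : Bool) : Prop := out = canTransforms_alt start end_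
instance (start : String) (end_ : String) (out : Bool) : Decidable (Spec_canTransforms start end_ out) := by unfold Spec_canTransforms; infer_instance

-- ===== CLAIM (what is proved, stated in full; the proofs are below) =====
def Claim_equal_canTransforms : Prop := ∀ (start : String) (end_ : String), Dom_canTransforms start end_ → Spec_canTransforms start end_ (canTransforms start end_)

-- ===== LEMMAS AND PROOFS =====

-- the filtered (char, index) data of a string suffix whose first index is i
def fLR : List Char → Int → List (Char × Int)
  | [], _ => []
  | c :: s, i => if c = 'R' ∨ c = 'L' then (c, i) :: fLR s (i + 1) else fLR s (i + 1)

theorem fLR_eq (l : List Char) : ∀ i : Int,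
    ((PySem.List.enumerate l i).filter (fun p => p.2 == 'R' || p.2 == 'L')).map
      (fun p => (p.2, p.1)) = fLR l i := by
  induction l with
  | nil => intro i; simp [PySem.List.enumerate_nil, fLR]
  | cons c s ih =>
      intro i
      simp only [PySem.List.enumerate_cons, List.filter_cons, fLR]
      by_cases h : c = 'R' ∨ c = 'L'
      · have : ((i, c).2 == 'R' || (i, c).2 == 'L') = true := by
          rcases h with h | h <;> simp [h]
        simp [this, ih, h]
      · have : ((i, c).2 == 'R' || (i, c).2 == 'L') = false := by
          simp [not_or] at h; simp [h.1, h.2]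
        simp [this, ih, h]

theorem scanB_eq : ∀ (s e : List Char) (i j : Int),
    scanB s e i j =
      (if (fLR s i).length = (fLR e j).length then goA (fLR s i) (fLR e j) else false) := by
  intro s e i j
  fun_induction scanB s e i j <;>
    simp_all [fLR, goA] <;> split_ifs <;> simp_all [goA] <;> try omega
  rename_i d e' hdor hcd hR hL ih hor
  rcases hor with h | h
  · subst h; rw [decide_eq_false (not_lt.mpr (hR rfl))]; simp
  · subst h; rw [decide_eq_false (not_lt.mpr (hL rfl))]; simp

-- ===== VERDICT (by name: the statement is the Claim_ definition above) =====
theorem canTransforms_spec : Claim_equal_canTransforms := by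
  intro start end_ _
  unfold Spec_canTransforms canTransforms canTransforms_alt
  rw [scanB_eq, fLR_eq, fLR_eq]
  split <;> simp_all
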